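-- pv_equiv track=rewrite | github.com/tmori9/atcoder | abc148/e.py | f
-- ===== SOURCE A (Python) =====
-- def f(n):
--     if n<2:
--         return 1
--     else:
--         if n % 10 != 0:
--             return f(n-2)
--         else:
--             return n*f(n-2)
-- ===== SOURCE B (Python) =====
-- def f(n):
--     # product of the multiples of 10 among n, n-2, ...: iterate m = n//10 down to 1
--     if n < 2 or n % 2 != 0:
--         return 1
--     r = 1
--     m = n // 10
--     while m >= 1:
--         r = (10 * m) * r
--         m -= 1
--     return r
-- ===== Notes on version B (the rewrite author's own statement) =====
-- stated objective: faster
-- what changed: Replaces the step-2 recursion over the whole sequence by an iterative loop over only the n//10 multiples of 10 (odd or small n return 1 immediately).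
-- outside the precondition, e.g. on f(8193): A returns 1, B returns 1
import Mathlib
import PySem

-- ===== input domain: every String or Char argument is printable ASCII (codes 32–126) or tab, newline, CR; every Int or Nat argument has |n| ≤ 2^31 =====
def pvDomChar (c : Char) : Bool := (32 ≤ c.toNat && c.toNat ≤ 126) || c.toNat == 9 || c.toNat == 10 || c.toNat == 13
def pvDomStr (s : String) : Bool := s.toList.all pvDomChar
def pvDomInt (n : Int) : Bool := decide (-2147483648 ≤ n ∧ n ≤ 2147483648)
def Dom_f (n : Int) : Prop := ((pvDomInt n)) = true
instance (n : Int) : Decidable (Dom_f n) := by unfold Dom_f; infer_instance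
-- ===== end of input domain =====

-- B replaces A's step-2 recursion over the whole sequence by a loop over only the n//10 multiples of 10.

-- ===== PORT A =====
def f (n : Int) : Int :=
  if n < 2 then 1
  else if PySem.Int.mod n 10 ≠ 0 then f (n - 2)
  else n * f (n - 2)
termination_by n.toNat
decreasing_by all_goals omega

-- ===== PORT B =====
-- the 'while m >= 1' loop of Source B, state (r, m)
def fAltLoop (r m : Int) : Int :=
  if 1 ≤ m then fAltLoop ((10 * m) * r) (m - 1) else r
termination_by m.toNat
decreasing_by omega

def f_alt (n : Int) : Int :=
  if n < 2 ∨ PySem.Int.mod n 2 ≠ 0 then 1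
  else fAltLoop 1 (PySem.Int.floordiv n 10)

-- ===== PRECONDITION & SPEC =====
-- Pre_ excludes large n (n > 8192), where A's unbounded step-2 recursion (n/2 nested calls)
-- overflows CPython's recursion limit and raises RecursionError; the exact overflow point
-- depends on the configured limit and the stack already in use, so on some excluded n below
-- it A still returns, and B returns the same value there.
def Pre_f (n : Int) : Prop := n ≤ 8192
instance (n : Int) : Decidable (Pre_f n) := by unfold Pre_f; infer_instance
def pvWitness_f : Int := (10)

def Spec_f (n : Int) (out : Int) : Prop := out = f_alt n
instance (n : Int) (out : Int) : Decidable (Spec_f n out) := by unfold Spec_f; infer_instance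

-- ===== CLAIM (what is proved, stated in full; the proofs are below) =====
def Claim_equal_f : Prop := ∀ (n : Int), Dom_f n → Pre_f n → Spec_f n (f n)

-- ===== LEMMAS AND PROOFS =====
lemma loop_mul : ∀ (k : Nat) (m r : Int), m.toNat = k → fAltLoop r m = fAltLoop 1 m * r := by
  intro k
  induction k with
  | zero =>
    intro m r hm
    have h1 : ¬ (1 ≤ m) := by omega
    rw [fAltLoop, if_neg h1, fAltLoop, if_neg h1, one_mul]
  | succ k ih =>
    intro m r hm
    have h1 : 1 ≤ m := by omega
    rw [fAltLoop, if_pos h1, ih (m - 1) ((10 * m) * r) (by omega)]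
    conv_rhs => rw [fAltLoop, if_pos h1]
    rw [ih (m - 1) ((10 * m) * 1) (by omega)]
    ring

lemma f_odd : ∀ (k : Nat) (n : Int), n.toNat ≤ k → n % 2 = 1 → f n = 1 := by
  intro k
  induction k with
  | zero =>
    intro n hn _
    rw [f]; simp [show n < 2 by omega]
  | succ k ih =>
    intro n hn hodd
    by_cases h2 : n < 2
    · rw [f]; simp [h2]
    · have hm : PySem.Int.mod n 10 = n % 10 := PySem.Int.mod_eq_emod_of_pos (by omega)
      rw [f]
      simp only [if_neg h2, hm]
      rw [if_pos (by omega)]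
      exact ih (n - 2) (by omega) (by omega)

lemma main_eq : ∀ (k : Nat) (n : Int), n.toNat ≤ k → f n = f_alt n := by
  intro k
  induction k with
  | zero =>
    intro n hn
    rw [f, f_alt]
    simp [show n < 2 by omega]
  | succ k ih =>
    intro n hn
    by_cases h2 : n < 2
    · rw [f, f_alt]; simp [h2]
    · have hm2 : PySem.Int.mod n 2 = n % 2 := PySem.Int.mod_eq_emod_of_pos (by omega)
      have hm10 : PySem.Int.mod n 10 = n % 10 := PySem.Int.mod_eq_emod_of_pos (by omega)
      have hd10 : PySem.Int.floordiv n 10 = n / 10 := PySem.Int.floordiv_eq_ediv_of_pos (by omega)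
      by_cases hodd : n % 2 = 1
      · rw [f_odd (k + 1) n hn hodd, f_alt]
        simp [hodd]
      · have heven : n % 2 = 0 := by omega
        have halt : f_alt n = fAltLoop 1 (n / 10) := by
          rw [f_alt, hd10]
          simp [heven, h2]
        by_cases h10 : n % 10 = 0
        · -- n ≥ 10; A multiplies n, B's loop peels off 10*(n/10) = n
          have hn10 : 10 ≤ n := by omega
          rw [f]
          simp only [if_neg h2, hm10, if_neg (by omega : ¬ n % 10 ≠ 0)]
          rw [ih (n - 2) (by omega)]
          have halt2 : f_alt (n - 2) = fAltLoop 1 ((n - 2) / 10) := by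
            rw [f_alt, PySem.Int.floordiv_eq_ediv_of_pos (by omega),
              PySem.Int.mod_eq_emod_of_pos (by omega)]
            simp [show ¬ (n - 2 < 2) by omega, show (n - 2) % 2 = 0 by omega]
          rw [halt2, halt]
          conv_rhs => rw [fAltLoop, if_pos (by omega : (1:Int) ≤ n / 10)]
          rw [loop_mul (n / 10 - 1).toNat (n / 10 - 1) _ rfl]
          rw [show (n - 2) / 10 = n / 10 - 1 by omega]
          rw [mul_one, show 10 * (n / 10) = n by omega]
          ring
        · -- last digit in {2,4,6,8}: same multiples of 10 below n and below n-2
          rw [f]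
          simp only [if_neg h2, hm10, if_pos (by omega : n % 10 ≠ 0)]
          rw [ih (n - 2) (by omega), halt]
          by_cases h4 : n < 4
          · have hn2 : n = 2 := by omega
            subst hn2
            norm_num [f_alt]
            rw [fAltLoop]
            norm_num
          · rw [f_alt, PySem.Int.floordiv_eq_ediv_of_pos (by omega),
              PySem.Int.mod_eq_emod_of_pos (by omega)]
            simp only [show ¬ (n - 2 < 2) by omega, show ¬ ((n - 2) % 2 ≠ 0) by omega,
              or_self, if_false]
            rw [show (n - 2) / 10 = n / 10 by omega]

-- ===== VERDICT (by name: the statement is the Claim_ definition above) =====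
theorem f_spec : Claim_equal_f := by
  intro n _ _
  unfold Spec_f
  exact main_eq n.toNat n le_rfl
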